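-- pv_equiv track=rewrite | github.com/1LStopBudapest/Helper | Binning_BKVal.py | findCR1BinIndexVal1
-- ===== SOURCE A (Python) =====
-- MT_bin = [0, 60, 95, 130, -1]
--
-- def findCR1BinIndexVal1(MT, LepChrg):
--     idx = -1
--     pickIdx = -1
--     for j in range(len(MT_bin)-1):
--         cut1 = MT>MT_bin[j] if j == len(MT_bin)-2 else MT>MT_bin[j] and MT<=MT_bin[j+1]
--         cutchrg = LepChrg==-1 if j < len(MT_bin)-3 else True # -1 charge only for first two MT bins
--         idx += 1
--         if (cut1 and LepChrg):
--             pickIdx = idx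
--             break
--
--     return pickIdx
-- ===== SOURCE B (Python) =====
-- import bisect
--
-- _MT_EDGES = [0, 60, 95, 130]
--
-- def findCR1BinIndexVal1(MT, LepChrg):
--     if not LepChrg:
--         return -1
--     return bisect.bisect_left(_MT_EDGES, MT) - 1
-- ===== Notes on version B (the rewrite author's own statement) =====
-- stated objective: idiomatic
-- what changed: Replaced the manual loop over bin pairs (with its dead cutchrg variable) by a falsy-charge guard plus bisect_left binary search over the sorted boundaries [0,60,95,130] minus one.
import Mathlib
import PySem

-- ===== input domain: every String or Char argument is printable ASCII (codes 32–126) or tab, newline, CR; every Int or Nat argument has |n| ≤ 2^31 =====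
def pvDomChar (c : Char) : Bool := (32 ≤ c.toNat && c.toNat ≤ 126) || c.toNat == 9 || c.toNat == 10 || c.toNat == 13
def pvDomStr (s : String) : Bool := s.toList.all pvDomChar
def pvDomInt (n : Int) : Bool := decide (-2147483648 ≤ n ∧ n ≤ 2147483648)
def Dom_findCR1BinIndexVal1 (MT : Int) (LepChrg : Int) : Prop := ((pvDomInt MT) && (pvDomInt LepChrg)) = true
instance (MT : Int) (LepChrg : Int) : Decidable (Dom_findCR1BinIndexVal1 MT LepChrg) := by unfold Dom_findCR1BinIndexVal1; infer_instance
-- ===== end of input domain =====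

-- B replaces A's manual scan over bin pairs by a charge guard plus bisect_left binary search over the sorted boundaries (more idiomatic).


-- ===== PORT A =====
def MT_bin : List Int := [0, 60, 95, 130, -1]

-- loop 'for j in range(len(MT_bin)-1)' with break: recursion over the remaining j's,
-- carrying idx and pickIdx exactly as A does (cutchrg is computed and unused, as in A).
def findCR1BinIndexVal1_loop (MT : Int) (LepChrg : Int) : List Nat → Int → Int → Int
  | [], _, pickIdx => pickIdx
  | j :: rest, idx, pickIdx =>
    let cut1 : Bool :=
      if j == MT_bin.length - 2 then decide (MT > MT_bin.getD j 0)
      else decide (MT > MT_bin.getD j 0) && decide (MT ≤ MT_bin.getD (j+1) 0)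
    let _cutchrg : Bool := if j < MT_bin.length - 3 then decide (LepChrg == -1) else true
    let idx' := idx + 1
    if cut1 && !(LepChrg == 0) then idx'
    else findCR1BinIndexVal1_loop MT LepChrg rest idx' pickIdx

def findCR1BinIndexVal1 (MT : Int) (LepChrg : Int) : Int :=
  findCR1BinIndexVal1_loop MT LepChrg (List.range (MT_bin.length - 1)) (-1) (-1)

-- ===== PORT B =====
def MT_edges : List Int := [0, 60, 95, 130]

-- bisect.bisect_left: binary search on (lo, hi), recursion on hi - lo.
def bisectLeft (xs : List Int) (x : Int) (lo hi : Nat) : Nat :=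
  if h : lo < hi then
    let mid := (lo + hi) / 2
    if xs.getD mid 0 < x then bisectLeft xs x (mid + 1) hi
    else bisectLeft xs x lo mid
  else lo
termination_by hi - lo
decreasing_by all_goals omega

def findCR1BinIndexVal1_alt (MT : Int) (LepChrg : Int) : Int :=
  if LepChrg == 0 then -1
  else (bisectLeft MT_edges MT 0 MT_edges.length : Int) - 1

-- ===== PRECONDITION & SPEC =====
def Spec_findCR1BinIndexVal1 (MT : Int) (LepChrg : Int) (out : Int) : Prop := out = findCR1BinIndexVal1_alt MT LepChrg
instance (MT : Int) (LepChrg : Int) (out : Int) : Decidable (Spec_findCR1BinIndexVal1 MT LepChrg out) := by unfold Spec_findCR1BinIndexVal1; infer_instance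

-- ===== CLAIM (what is proved, stated in full; the proofs are below) =====
def Claim_equal_findCR1BinIndexVal1 : Prop := ∀ (MT : Int) (LepChrg : Int), Dom_findCR1BinIndexVal1 MT LepChrg → Spec_findCR1BinIndexVal1 MT LepChrg (findCR1BinIndexVal1 MT LepChrg)

-- ===== LEMMAS AND PROOFS =====
theorem bisectLeft_eval (x : Int) :
    bisectLeft MT_edges x 0 4 =
      if x ≤ 0 then 0 else if x ≤ 60 then 1 else if x ≤ 95 then 2 else if x ≤ 130 then 3 else 4 := by
  unfold bisectLeft; unfold bisectLeft; unfold bisectLeft; unfold bisectLeft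
  simp only [MT_edges, List.getD]
  norm_num
  split_ifs <;> omega

-- ===== VERDICT (by name: the statement is the Claim_ definition above) =====
theorem findCR1BinIndexVal1_spec : Claim_equal_findCR1BinIndexVal1 := by
  intro MT LepChrg _
  unfold Spec_findCR1BinIndexVal1 findCR1BinIndexVal1 findCR1BinIndexVal1_alt
  rw [show MT_edges.length = 4 from rfl, bisectLeft_eval MT]
  rw [show List.range (MT_bin.length - 1) = [0,1,2,3] from rfl]
  simp only [findCR1BinIndexVal1_loop, MT_bin, List.getD, List.length]
  norm_num
  split_ifs <;> omega
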